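-- pv_equiv track=rewrite | github.com/CKPEIIKA/ofti | ofti/tools/runtime_control_service.py | runtime_conditions_gate
-- ===== SOURCE A (Python) =====
-- _CONDITIONS_NOT_MET_TOKENS = ("conditions not met", "condition not met")
--
-- _CONDITIONS_MET_TOKENS = ("conditions met", "condition met")
--
-- def runtime_conditions_gate(lines: list[str]) -> tuple[str | None, str | None]:
--     for raw in reversed(lines):
--         line = raw.strip()
--         lower = line.lower()
--         if line_reports_conditions_not_met(lower):
--             return "unmet", line
--         if line_reports_conditions_met(lower):
--             return "met", line
--     return None, None
--
-- def line_reports_conditions_not_met(lower_line: str) -> bool: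
--     return any(token in lower_line for token in _CONDITIONS_NOT_MET_TOKENS)
--
-- def line_reports_conditions_met(lower_line: str) -> bool:
--     if line_reports_conditions_not_met(lower_line):
--         return False
--     return any(token in lower_line for token in _CONDITIONS_MET_TOKENS)
-- ===== SOURCE B (Python) =====
-- def _classify(raw):
--     """Classify one line: ('unmet', line) / ('met', line) / None; not-met wins within a line."""
--     line = raw.strip()
--     lower = line.lower()
--     if "conditions not met" in lower or "condition not met" in lower:
--         return ("unmet", line)
--     if "conditions met" in lower or "condition met" in lower:
--         return ("met", line)
--     return None
--
--
-- def runtime_conditions_gate(lines: list[str]) -> tuple[str | None, str | None]: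
--     # Staged: classify every line, then take the last match (A's reverse scan finds it first).
--     hits = [h for h in map(_classify, lines) if h is not None]
--     return hits[-1] if hits else (None, None)
-- ===== Notes on version B (the rewrite author's own statement) =====
-- stated objective: alternative
-- what changed: Replaces A's reversed early-return scan with a staged pipeline: classify every line into an optional verdict in one mapping pass, filter the matches, and return the last one; the per-line met check also drops A's redundant second not-met scan since the branch order already gives it priority.
import Mathlib
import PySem

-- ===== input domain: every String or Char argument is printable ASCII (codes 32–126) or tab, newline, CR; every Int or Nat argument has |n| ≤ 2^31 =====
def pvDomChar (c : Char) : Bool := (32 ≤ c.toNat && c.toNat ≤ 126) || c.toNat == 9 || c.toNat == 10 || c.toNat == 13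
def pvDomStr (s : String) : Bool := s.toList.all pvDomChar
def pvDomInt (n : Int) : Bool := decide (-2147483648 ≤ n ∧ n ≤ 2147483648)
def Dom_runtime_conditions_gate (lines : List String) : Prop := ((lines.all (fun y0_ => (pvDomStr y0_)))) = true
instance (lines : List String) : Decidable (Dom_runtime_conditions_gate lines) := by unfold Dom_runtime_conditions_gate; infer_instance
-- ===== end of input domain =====

-- B replaces A's reversed early-return scan by a staged classify-then-take-last pipeline (alternative decomposition, same cost).

-- ===== PORT A =====
-- any(token in lower_line for token in _CONDITIONS_NOT_MET_TOKENS)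
def pvA_notMet (lowerLine : String) : Bool :=
  PySem.Str.isIn "conditions not met" lowerLine || PySem.Str.isIn "condition not met" lowerLine

-- line_reports_conditions_met: re-checks the not-met tokens first, then the met tokens
def pvA_met (lowerLine : String) : Bool :=
  if pvA_notMet lowerLine then false
  else PySem.Str.isIn "conditions met" lowerLine || PySem.Str.isIn "condition met" lowerLine

-- the 'for raw in reversed(lines)' loop with its early returns
def pvA_loop : List String → Option String × Option String
  | [] => (none, none)
  | raw :: rest =>
    let line := PySem.Str.strip raw
    let lower := PySem.Str.lower line
    if pvA_notMet lower then (some "unmet", some line)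
    else if pvA_met lower then (some "met", some line)
    else pvA_loop rest

def runtime_conditions_gate (lines : List String) : Option String × Option String :=
  pvA_loop lines.reverse

-- ===== PORT B =====
-- _classify: one line's optional verdict
def pvB_classify (raw : String) : Option (Option String × Option String) :=
  let line := PySem.Str.strip raw
  let lower := PySem.Str.lower line
  if PySem.Str.isIn "conditions not met" lower || PySem.Str.isIn "condition not met" lower then
    some (some "unmet", some line)
  else if PySem.Str.isIn "conditions met" lower || PySem.Str.isIn "condition met" lower then
    some (some "met", some line)
  else none

-- hits = [h for h in map(_classify, lines) if h is not None]; hits[-1] if hits else (None, None)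
def runtime_conditions_gate_alt (lines : List String) : Option String × Option String :=
  ((lines.filterMap pvB_classify).getLast?).getD (none, none)

-- ===== PRECONDITION & SPEC =====
def Spec_runtime_conditions_gate (lines : List String) (out : Option String × Option String) : Prop := out = runtime_conditions_gate_alt lines
instance (lines : List String) (out : Option String × Option String) : Decidable (Spec_runtime_conditions_gate lines out) := by unfold Spec_runtime_conditions_gate; infer_instance

-- ===== CLAIM (what is proved, stated in full; the proofs are below) =====
def Claim_equal_runtime_conditions_gate : Prop := ∀ (lines : List String), Dom_runtime_conditions_gate lines → Spec_runtime_conditions_gate lines (runtime_conditions_gate lines)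

-- ===== LEMMAS AND PROOFS =====

-- A's early-return scan equals 'first classification hit' of the list it scans
theorem pvA_loop_eq_head (l : List String) :
    pvA_loop l = ((l.filterMap pvB_classify).head?).getD (none, none) := by
  induction l with
  | nil => rfl
  | cons raw rest ih =>
    rw [List.filterMap_cons, pvA_loop]
    simp only [pvA_notMet, pvA_met, pvB_classify]
    split_ifs with h1 h2
    · rfl
    · rfl
    · exact ih

-- ===== VERDICT (by name: the statement is the Claim_ definition above) =====
theorem runtime_conditions_gate_spec : Claim_equal_runtime_conditions_gate := by
  intro lines _
  show runtime_conditions_gate lines = runtime_conditions_gate_alt lines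
  unfold runtime_conditions_gate runtime_conditions_gate_alt
  rw [pvA_loop_eq_head, List.filterMap_reverse, List.head?_reverse]
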